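-- pv_equiv track=rewrite | github.com/miliar/Code_Jam_Webscraper | solutions_python/Problem_97/1618.py | isRecycled
-- ===== SOURCE A (Python) =====
-- def isRecycled(n, m):
--     A = str(n)
--     B = str(m)
--     length = len(A)
--     if len(A)!=len(B) or length==1: return False
--
--
--     for i in range(1, length):
--         test = A[-i:]+A[:length-i]
--
--         if test[0] == '0': continue
--
--         if test == B:
--             return True
--     return False
-- ===== SOURCE B (Python) =====
-- def isRecycled(n, m):
--     A = str(n)
--     B = str(m)
--     length = len(A)
--     if length != len(B) or length == 1:
--         return False
--     if B[0] == '0':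
--         return False
--     return B in (A + A)[1:-1]
-- ===== Notes on version B (the rewrite author's own statement) =====
-- stated objective: idiomatic
-- what changed: Replaces the explicit loop that builds every rotation by two slices with the classic doubled-string trick: B is a non-trivial rotation of A iff B occurs in (A+A)[1:-1]; the leading-zero skip of A collapses into a single B[0] != '0' guard since any rotation equal to B starts with B's first character.
import Mathlib
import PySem

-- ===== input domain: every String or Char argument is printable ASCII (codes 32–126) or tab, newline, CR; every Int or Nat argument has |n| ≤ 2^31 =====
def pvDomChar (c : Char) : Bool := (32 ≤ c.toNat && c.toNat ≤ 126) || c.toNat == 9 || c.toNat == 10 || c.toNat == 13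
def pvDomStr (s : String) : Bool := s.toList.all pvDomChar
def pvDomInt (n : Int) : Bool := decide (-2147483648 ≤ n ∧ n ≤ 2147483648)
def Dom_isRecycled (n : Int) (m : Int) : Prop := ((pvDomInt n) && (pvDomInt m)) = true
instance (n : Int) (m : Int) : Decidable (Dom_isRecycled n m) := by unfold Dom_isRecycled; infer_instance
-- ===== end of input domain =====

-- B replaces the rotation-building loop by the doubled-string trick (B in (A+A)[1:-1]) with a single
-- leading-zero guard on B; objective: idiomatic, same result proved equal.


-- ===== PORT A =====
-- the 'for i in range(1, length)' loop with its 'continue' and early 'return True'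
def isRecycledLoop (A B : List Char) (length : Int) : List Int → Bool
  | [] => false
  | i :: rest =>
    let test := PySem.List.slice A (some (-i)) none ++ PySem.List.slice A none (some (length - i))
    if PySem.List.pyGet? test 0 == some '0' then isRecycledLoop A B length rest
    else if test == B then true
    else isRecycledLoop A B length rest

def isRecycled (n : Int) (m : Int) : Bool :=
  let A := PySem.Int.toChars n
  let B := PySem.Int.toChars m
  let length : Int := A.length
  if (A.length : Int) ≠ (B.length : Int) ∨ length = 1 then false
  else isRecycledLoop A B length (PySem.List.pyRange 1 length 1)

-- ===== PORT B =====
def isRecycled_alt (n : Int) (m : Int) : Bool :=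
  let A := PySem.Int.toChars n
  let B := PySem.Int.toChars m
  let length : Int := A.length
  if length ≠ (B.length : Int) ∨ length = 1 then false
  else if PySem.List.pyGet? B 0 == some '0' then false
  else PySem.Chars.isIn B (PySem.List.slice (A ++ A) (some 1) (some (-1)))

-- ===== PRECONDITION & SPEC =====
def Spec_isRecycled (n : Int) (m : Int) (out : Bool) : Prop := out = isRecycled_alt n m
instance (n : Int) (m : Int) (out : Bool) : Decidable (Spec_isRecycled n m out) := by unfold Spec_isRecycled; infer_instance

-- ===== CLAIM (what is proved, stated in full; the proofs are below) =====
def Claim_equal_isRecycled : Prop := ∀ (n : Int) (m : Int), Dom_isRecycled n m → Spec_isRecycled n m (isRecycled n m)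

-- ===== LEMMAS AND PROOFS =====

lemma toDigitsCore_length_le (b f n : Nat) (acc : List Char) :
    acc.length ≤ (Nat.toDigitsCore b f n acc).length := by
  induction f generalizing n acc with
  | zero => simp [Nat.toDigitsCore]
  | succ f ih =>
    simp only [Nat.toDigitsCore]
    split
    · simp
    · exact le_trans (by simp) (ih _ _)

lemma toChars_ne_nil (n : Int) : PySem.Int.toChars n ≠ [] := by
  unfold PySem.Int.toChars
  split
  · simp
  · intro h
    unfold Nat.toDigits at h
    simp only [Nat.toDigitsCore] at h
    split at h
    · simp at h
    · have := toDigitsCore_length_le 10 n.toNat (n.toNat / 10) [(n.toNat % 10).digitChar]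
      rw [h] at this
      simp at this

-- the loop is an 'any' over the index list
lemma loop_eq_any (A B : List Char) (len : Int) (lst : List Int) :
    isRecycledLoop A B len lst =
      lst.any (fun i =>
        !(PySem.List.pyGet? (PySem.List.slice A (some (-i)) none ++ PySem.List.slice A none (some (len - i))) 0 == some '0')
        && ((PySem.List.slice A (some (-i)) none ++ PySem.List.slice A none (some (len - i))) == B)) := by
  induction lst with
  | nil => simp [isRecycledLoop]
  | cons i rest ih =>
    simp only [isRecycledLoop, List.any_cons]
    by_cases h0 : PySem.List.pyGet? (PySem.List.slice A (some (-i)) none ++ PySem.List.slice A none (some (len - i))) 0 == some '0'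
    · simp [h0, ih]
    · by_cases hB : (PySem.List.slice A (some (-i)) none ++ PySem.List.slice A none (some (len - i))) == B
      · simp [h0, hB]
      · simp [h0, hB, ih]

-- the rotation built by A's two slices, for 1 ≤ i < len(A)
lemma rot_eq (A : List Char) (i : Int) (h1 : 1 ≤ i) (h2 : i < (A.length : Int)) :
    PySem.List.slice A (some (-i)) none ++ PySem.List.slice A none (some ((A.length : Int) - i))
      = A.drop (A.length - i.toNat) ++ A.take (A.length - i.toNat) := by
  obtain ⟨k, hk⟩ : ∃ k : Nat, i = (k : Int) := ⟨i.toNat, by omega⟩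
  subst hk
  rw [PySem.List.slice_from_neg_natCast A k (by exact_mod_cast h1),
      PySem.List.slice_to A (by omega)]
  have hk : (((A.length : Int)) - (k : Int)).toNat = A.length - k := by omega
  rw [hk, Int.toNat_natCast]

-- a length-|A| segment of A++A starting at p ≤ |A| is the rotation by p
lemma double_seg (A : List Char) (p : Nat) (hp : p ≤ A.length) :
    ((A ++ A).drop p).take A.length = A.drop p ++ A.take p := by
  rw [List.drop_append, Nat.sub_eq_zero_of_le hp, List.drop_zero,
      List.take_append, List.take_of_length_le (by simp)]
  congr 1
  simp
  omega

lemma prefix_suffix_infix {α : Type} {l1 l2 l3 : List α} (h1 : l1 <+: l2) (h2 : l2 <:+ l3) :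
    l1 <:+: l3 := by
  obtain ⟨t, ht⟩ := h1
  obtain ⟨s, hs⟩ := h2
  exact ⟨s, t, by rw [List.append_assoc, ht, hs]⟩

-- B occurs in (A+A)[1:-1] iff B is a proper rotation of A
lemma infix_mid_iff (A B : List Char) (hL : B.length = A.length) (h2 : 2 ≤ A.length) :
    B <:+: ((A ++ A).drop 1).take (2 * A.length - 2)
      ↔ ∃ p : Nat, 1 ≤ p ∧ p ≤ A.length - 1 ∧ B = A.drop p ++ A.take p := by
  constructor
  · rintro ⟨s, t, hst⟩
    have hlenmid : (((A ++ A).drop 1).take (2 * A.length - 2)).length = 2 * A.length - 2 := by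
      simp; omega
    have hlen : s.length + B.length + t.length = 2 * A.length - 2 := by
      rw [← hlenmid, ← hst]; simp; omega
    refine ⟨s.length + 1, by omega, by omega, ?_⟩
    have hdrop : (((A ++ A).drop 1).take (2 * A.length - 2)).drop s.length = B ++ t := by
      rw [← hst, List.drop_append]
      simp
    have hB : B = ((((A ++ A).drop 1).take (2 * A.length - 2)).drop s.length).take B.length := by
      rw [hdrop, List.take_append, List.take_of_length_le (le_refl _),
          Nat.sub_self, List.take_zero, List.append_nil]
    rw [hB, List.drop_take, List.drop_drop, List.take_take]
    rw [show min B.length (2 * A.length - 2 - s.length) = B.length by omega]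
    rw [show s.length + 1 = s.length + 1 from rfl, hL]
    rw [show (1 : Nat) + s.length = s.length + 1 by omega] at *
    exact double_seg A (s.length + 1) (by omega)
  · rintro ⟨p, hp1, hp2, hB⟩
    have hBseg : B = ((A ++ A).drop p).take A.length := by
      rw [hB, double_seg A p (by omega)]
    apply prefix_suffix_infix (l2 := (((A ++ A).drop 1).take (2 * A.length - 2)).drop (p - 1))
    · rw [List.prefix_iff_eq_take, hL]
      rw [List.drop_take, List.drop_drop]
      rw [show 1 + (p - 1) = p by omega, List.take_take]
      rw [show min A.length (2 * A.length - 2 - (p - 1)) = A.length by omega]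
      exact hBseg
    · exact List.drop_suffix _ _
  
-- the central equality, on arbitrary character lists
lemma main_eq (A B : List Char) (hA : A ≠ []) (hlen : B.length = A.length) (h1 : A.length ≠ 1) :
    isRecycledLoop A B (A.length : Int) (PySem.List.pyRange 1 (A.length : Int) 1)
      = (!(PySem.List.pyGet? B 0 == some '0')
          && PySem.Chars.isIn B (PySem.List.slice (A ++ A) (some 1) (some (-1)))) := by
  have h0 : A.length ≠ 0 := fun h => hA (List.length_eq_zero_iff.mp h)
  have h2 : 2 ≤ A.length := by omega
  have hmid : PySem.List.slice (A ++ A) (some 1) (some (-1))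
      = ((A ++ A).drop 1).take (2 * A.length - 2) := by
    simp only [PySem.List.slice, PySem.List.clampIdx, List.length_append]
    rw [if_pos (by omega : (-1 : Int) < 0), if_neg (by omega),
        if_neg (by omega : ¬ (1 : Int) < 0),
        show min (Int.toNat 1) (A.length + A.length) = 1 by omega]
    congr 1
    omega
  rw [loop_eq_any, hmid, Bool.eq_iff_iff, List.any_eq_true, Bool.and_eq_true,
      PySem.Chars.isIn_iff_infix, infix_mid_iff A B hlen h2]
  constructor
  · rintro ⟨i, hi, hcond⟩
    rw [PySem.List.mem_pyRange_one] at hi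
    rw [rot_eq A i hi.1 hi.2] at hcond
    simp only [Bool.and_eq_true, Bool.not_eq_true', beq_iff_eq, beq_eq_false_iff_ne] at hcond
    obtain ⟨hz, heq⟩ := hcond
    refine ⟨?_, A.length - i.toNat, by omega, by omega, heq.symm⟩
    rw [heq] at hz
    simpa using hz
  · rintro ⟨hz, p, hp1, hp2, hB⟩
    refine ⟨((A.length - p : Nat) : Int), ?_, ?_⟩
    · rw [PySem.List.mem_pyRange_one]
      constructor <;> [exact_mod_cast Nat.one_le_iff_ne_zero.mpr (by omega); exact_mod_cast (by omega : A.length - p < A.length)]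
    · rw [rot_eq A _ (by exact_mod_cast Nat.one_le_iff_ne_zero.mpr (by omega))
            (by exact_mod_cast (by omega : A.length - p < A.length))]
      rw [Int.toNat_natCast, show A.length - (A.length - p) = p by omega]
      simp only [Bool.and_eq_true, Bool.not_eq_true', beq_iff_eq, beq_eq_false_iff_ne]
      exact ⟨by rw [← hB]; simpa using hz, hB.symm⟩

-- ===== VERDICT (by name: the statement is the Claim_ definition above) =====
theorem isRecycled_spec : Claim_equal_isRecycled := by
  intro n m _
  unfold Spec_isRecycled isRecycled isRecycled_alt
  simp only []
  set A := PySem.Int.toChars n with hA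
  set B := PySem.Int.toChars m with hB
  by_cases hg : (A.length : Int) ≠ (B.length : Int) ∨ (A.length : Int) = 1
  · rw [if_pos hg, if_pos hg]
  · rw [if_neg hg, if_neg hg]
    rw [not_or] at hg
    obtain ⟨hgl, hg1⟩ := hg
    have hlen : B.length = A.length := by omega
    have h1 : A.length ≠ 1 := by omega
    rw [main_eq A B (toChars_ne_nil n) hlen h1]
    by_cases hz : PySem.List.pyGet? B 0 == some '0'
    · rw [if_pos hz, hz]; simp
    · rw [if_neg hz]
      simp only [Bool.not_eq_true] at hz
      rw [(by simpa using hz : (PySem.List.pyGet? B 0 == some '0') = false)]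
      simp
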